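-- pv_equiv track=rewrite | github.com/agh-bit-academy/SummerProject2022 | WDI/Zestaw_3/Zadanie_04/sol.py | f
-- ===== SOURCE A (Python) =====
-- def f(n):
--     add = [0 for _ in range(n + 1)]
--     add[0] = 1
--     mul = [0 for _ in range(n + 1)]
--     mul[0] = 1
--     i = 1
--     while max(mul) > 0:
--         rest = 0
--         tmp = 0
--         for j in range(n, -1, -1):
--             tmp = add[j] + mul[j] + rest
--             rest = tmp // 10
--             add[j] = tmp % 10
--         i += 1
--         r = 0
--         for k in range(n + 1):
--             r *= 10
--             r += mul[k]
--             mul[k] = r // i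
--             r %= i
--     return add
-- ===== SOURCE B (Python) =====
-- def f(n):
--     # The digit value A computes equals sum_{k>=0} floor(10**n / k!).  Instead of
--     # summing that series, write P = 10**n in the FACTORIAL NUMBER SYSTEM,
--     # P = sum_k c_k * k! (0 <= c_k <= k); then the identity
--     #   sum_{k>=0} floor(P/k!) = P + sum_k c_k * b_k,  b_k = sum_{j=1..k} k!/j!
--     # (b_1 = 1, b_{k+1} = (k+1)*b_k + 1) gives the value from the digits directly.
--     P = 10 ** n
--     q, k, cs = P, 2, []
--     while q > 0:
--         cs.append(q % k)
--         q //= k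
--         k += 1
--     s, b, j = P, 1, 1
--     for d in cs:
--         s += d * b
--         j += 1
--         b = j * b + 1
--     out = [0] * (n + 1)
--     for idx in range(n, -1, -1):
--         out[idx] = s % 10
--         s //= 10
--     return out
-- ===== Notes on version B (the rewrite author's own statement) =====
-- stated objective: faster
-- what changed: Instead of A's term-by-term series accumulation (repeated digit-array carry-addition and long division), B writes 10**n in the factorial number system and obtains the same value by the closed-form identity sum_k floor(P/k!) = P + sum_k c_k*b_k with b_k = k*b_{k-1}+1, then extracts the decimal digits once.
-- outside the precondition, e.g. on f(-1): A raises IndexError, B returns []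
import Mathlib
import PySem

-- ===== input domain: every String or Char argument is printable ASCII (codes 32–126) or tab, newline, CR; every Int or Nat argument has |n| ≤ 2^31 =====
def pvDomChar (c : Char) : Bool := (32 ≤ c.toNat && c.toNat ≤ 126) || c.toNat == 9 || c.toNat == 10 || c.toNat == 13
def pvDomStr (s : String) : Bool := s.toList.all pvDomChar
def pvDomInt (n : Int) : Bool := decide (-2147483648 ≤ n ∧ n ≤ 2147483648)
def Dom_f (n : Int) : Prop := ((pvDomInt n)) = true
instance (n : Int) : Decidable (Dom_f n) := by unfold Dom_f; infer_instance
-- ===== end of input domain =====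

-- B replaces A's term-by-term series accumulation over digit arrays by a factorial-number-system
-- expansion of 10^n plus a weighted digit sum (b_k = k*b_{k-1}+1), extracting decimal digits once.


-- ===== PORT A =====

/-- all entries are base-10 digits -/
def DigitsOk (l : List Int) : Prop := ∀ d ∈ l, 0 ≤ d ∧ d < 10

/-- the integer a digit list denotes (proof device; also the while-loop measure) -/
def val (l : List Int) : Int := l.foldl (fun a d => 10 * a + d) 0

theorem foldl_shift (l : List Int) (a : Int) :
    l.foldl (fun a d => 10 * a + d) a = a * 10 ^ l.length + l.foldl (fun a d => 10 * a + d) 0 := by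
  induction l generalizing a with
  | nil => simp
  | cons x xs ih =>
    simp only [List.foldl_cons, List.length_cons]
    rw [ih (10 * a + x), ih (10 * 0 + x)]
    ring

theorem val_cons (d : Int) (ds : List Int) :
    val (d :: ds) = d * 10 ^ ds.length + val ds := by
  simp only [val, List.foldl_cons]
  rw [foldl_shift]
  ring

theorem val_nonneg {l : List Int} (h : ∀ d ∈ l, 0 ≤ d) : 0 ≤ val l := by
  induction l with
  | nil => simp [val]
  | cons x xs ih =>
    rw [val_cons]
    have hx := h x (by simp)
    have := ih (fun d hd => h d (List.mem_cons_of_mem _ hd))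
    positivity

/-- some element positive, all nonnegative → positive value -/
theorem val_pos {l : List Int} (h0 : ∀ d ∈ l, 0 ≤ d) {m : Int} (hm : m ∈ l) (hmp : 0 < m) :
    0 < val l := by
  induction l with
  | nil => cases hm
  | cons x xs ih =>
    rw [val_cons]
    have hxs := val_nonneg (fun d hd => h0 d (List.mem_cons_of_mem _ hd))
    have hp : (0:Int) < 10 ^ xs.length := by positivity
    rcases List.mem_cons.mp hm with rfl | hm'
    · nlinarith
    · have := ih (fun d hd => h0 d (List.mem_cons_of_mem _ hd)) hm'
      have hx := h0 x (by simp)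
      nlinarith

/-- the second inner loop of A: left-to-right long division of the digit list by i,
    threading the remainder r (r *= 10; r += mul[k]; mul[k] = r//i; r %= i) -/
def divStep (i r : Int) : List Int → List Int
  | [] => []
  | m :: ms =>
    let r1 := r * 10 + m
    PySem.Int.floordiv r1 i :: divStep i (PySem.Int.mod r1 i) ms

theorem divStep_length (i r : Int) (l : List Int) : (divStep i r l).length = l.length := by
  induction l generalizing r with
  | nil => rfl
  | cons m ms ih => simp [divStep, ih]

theorem divStep_digitsOk {i : Int} (hi : 0 < i) (l : List Int) :
    DigitsOk l → ∀ (r : Int), 0 ≤ r → r < i → DigitsOk (divStep i r l) := by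
  induction l with
  | nil => intro _ r _ _ d hd; cases hd
  | cons m ms ih =>
    intro hl r hr0 hri d hd
    have hm := hl m (by simp)
    simp only [divStep, List.mem_cons] at hd
    rcases hd with rfl | hd
    · rw [PySem.Int.floordiv_eq_ediv_of_pos hi]
      exact ⟨Int.ediv_nonneg (by nlinarith) (le_of_lt hi),
             Int.ediv_lt_of_lt_mul hi (by nlinarith)⟩
    · exact ih (fun d hd => hl d (List.mem_cons_of_mem _ hd)) _
        (PySem.Int.mod_nonneg _ hi) (PySem.Int.mod_lt _ hi) d hd

theorem divStep_val {i : Int} (hi : 0 < i) (l : List Int) :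
    ∀ (r : Int), 0 ≤ r → r < i → val (divStep i r l) = (r * 10 ^ l.length + val l) / i := by
  induction l with
  | nil =>
    intro r hr0 hri
    simp only [divStep, val, List.foldl_nil, List.length_nil, pow_zero, mul_one, add_zero]
    exact (Int.ediv_eq_zero_of_lt hr0 hri).symm
  | cons m ms ih =>
    intro r hr0 hri
    simp only [divStep]
    rw [val_cons, divStep_length,
        ih _ (PySem.Int.mod_nonneg (r * 10 + m) hi) (PySem.Int.mod_lt (r * 10 + m) hi),
        PySem.Int.floordiv_eq_ediv_of_pos hi, PySem.Int.mod_eq_emod_of_pos hi]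
    have hsplit : r * 10 ^ (m :: ms).length + val (m :: ms)
        = ((r * 10 + m) % i * 10 ^ ms.length + val ms) + ((r * 10 + m) / i * 10 ^ ms.length) * i := by
      have h := Int.emod_add_mul_ediv (r * 10 + m) i
      rw [val_cons]
      simp only [List.length_cons, pow_succ]
      linear_combination (-(10:Int) ^ ms.length) * h
    rw [hsplit, Int.add_mul_ediv_right _ _ (ne_of_gt hi)]
    ring

/-- decrease of the loop measure: dividing a positive digit value by i+1 ≥ 2 shrinks it -/
theorem divStep_measure_lt {i : Int} (hi : 1 ≤ i) {mul : List Int}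
    (hpos : 0 < val mul) :
    (val (divStep (i + 1) 0 mul)).toNat < (val mul).toNat := by
  have h2 : (0:Int) < i + 1 := by omega
  rw [divStep_val h2 mul 0 le_rfl h2]
  simp only [zero_mul, zero_add]
  have hlt : val mul / (i + 1) < val mul :=
    Int.ediv_lt_of_lt_mul h2 (by nlinarith)
  have hge : 0 ≤ val mul / (i + 1) := Int.ediv_nonneg (le_of_lt hpos) (le_of_lt h2)
  omega

/-- the first inner loop of A: right-to-left digit addition with carry
    (returns the new digit list and the carry dropped off the front) -/
def addFrom : List Int → List Int → List Int × Int
  | a :: as, m :: ms =>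
    let p := addFrom as ms
    let tmp := a + m + p.2
    (PySem.Int.mod tmp 10 :: p.1, PySem.Int.floordiv tmp 10)
  | _, _ => ([], 0)

/-- the while loop of A; the two Prop parameters only make termination provable -/
def loopA (i : Int) (add mul : List Int) (hmul : DigitsOk mul) (hi : 1 ≤ i) : List Int :=
  match hmx : PySem.List.max? mul id with
  | none => add      -- Python: max([]) raises ValueError (only for n < 0, outside Pre_f)
  | some m =>
    if hm : 0 < m then
      loopA (i + 1) (addFrom add mul).1 (divStep (i + 1) 0 mul)
        (divStep_digitsOk (by omega) mul hmul 0 le_rfl (by omega)) (by omega)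
    else add
termination_by (val mul).toNat
decreasing_by
  exact divStep_measure_lt hi
    (val_pos (fun d hd => (hmul d hd).1) (PySem.List.max?_mem hmx) hm)

theorem digitsOk_init (k : Nat) : DigitsOk ((List.replicate k 0).set 0 1) := by
  intro d hd
  rcases List.mem_or_eq_of_mem_set hd with h | rfl
  · have := List.eq_of_mem_replicate h; omega
  · omega

def f (n : Int) : List Int :=
  -- add = [0]*(n+1); add[0] = 1  (for n < 0 the list is empty and Python raises IndexError, outside Pre_f)
  let add := (List.replicate (n + 1).toNat 0).set 0 1
  let mul := (List.replicate (n + 1).toNat 0).set 0 1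
  loopA 1 add mul (digitsOk_init _) le_rfl

-- ===== PORT B =====

/-- B's first loop: the factorial-number-system digits of q
    (while q > 0: cs.append(q % k); q //= k; k += 1) -/
def csLoop (q k : Int) (hk : 2 ≤ k) : List Int :=
  if h : 0 < q then
    PySem.Int.mod q k :: csLoop (PySem.Int.floordiv q k) (k + 1) (by omega)
  else []
termination_by q.toNat
decreasing_by
  rw [PySem.Int.floordiv_eq_ediv_of_pos (by omega : (0:Int) < k)]
  have hlt : q / k < q := Int.ediv_lt_of_lt_mul (by omega) (by nlinarith)
  omega

/-- B's second loop: for d in cs: s += d*b; j += 1; b = j*b + 1 (state (s, b, j)) -/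
def sumLoop (cs : List Int) (s b j : Int) : Int :=
  (cs.foldl (fun st d => (st.1 + d * st.2.1, (st.2.2 + 1) * st.2.1 + 1, st.2.2 + 1)) (s, b, j)).1

/-- B's final loop: for idx in range(n, -1, -1): out[idx] = s % 10; s //= 10 -/
def fillLoop (idx s : Int) (out : List Int) : List Int :=
  if h : 0 ≤ idx then
    fillLoop (idx - 1) (PySem.Int.floordiv s 10) (out.set idx.toNat (PySem.Int.mod s 10))
  else out
termination_by (idx + 1).toNat
decreasing_by omega

def f_alt (n : Int) : List Int :=
  let P : Int := 10 ^ n.toNat   -- Python's 10 ** n (for n < 0 a float, outside Pre_f)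
  let cs := csLoop P 2 (by omega)
  let s := sumLoop cs P 1 1
  fillLoop n s (List.replicate (n + 1).toNat 0)

-- ===== PRECONDITION & SPEC =====
-- Pre_f excludes exactly n < 0, where A raises IndexError (add[0] on the empty list).
def Pre_f (n : Int) : Prop := 0 ≤ n
instance (n : Int) : Decidable (Pre_f n) := by unfold Pre_f; infer_instance

def pvWitness_f : Int := 3

def Spec_f (n : Int) (out : List Int) : Prop := out = f_alt n
instance (n : Int) (out : List Int) : Decidable (Spec_f n out) := by unfold Spec_f; infer_instance

-- ===== CLAIM (what is proved, stated in full; the proofs are below) =====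
def Claim_equal_f : Prop := ∀ (n : Int), Dom_f n → Pre_f n → Spec_f n (f n)

-- ===== LEMMAS AND PROOFS =====

/-- proof device: A's while loop on the VALUES of the two digit lists
    (while mul > 0: add += mul; i += 1; mul //= i) -/
def intLoop (i add mul : Int) (hi : 1 ≤ i) : Int :=
  if h : 0 < mul then
    intLoop (i + 1) (add + mul) (PySem.Int.floordiv mul (i + 1)) (by omega)
  else add
termination_by mul.toNat
decreasing_by
  rw [PySem.Int.floordiv_eq_ediv_of_pos (by omega : (0:Int) < i + 1)]
  have hlt : mul / (i + 1) < mul := Int.ediv_lt_of_lt_mul (by omega) (by nlinarith)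
  omega

/-- proof device: the nested-floor-division sum N k m = m + N (k+1) (m // k) -/
def nsum (k m : Int) (hk : 2 ≤ k) : Int :=
  if h : 0 < m then
    m + nsum (k + 1) (PySem.Int.floordiv m k) (by omega)
  else 0
termination_by m.toNat
decreasing_by
  rw [PySem.Int.floordiv_eq_ediv_of_pos (by omega : (0:Int) < k)]
  have hlt : m / k < m := Int.ediv_lt_of_lt_mul (by omega) (by nlinarith)
  omega

theorem addFrom_spec : ∀ (a m : List Int), a.length = m.length →
    DigitsOk a → (∀ d ∈ m, 0 ≤ d) →
    (addFrom a m).1.length = a.length ∧ DigitsOk (addFrom a m).1 ∧ 0 ≤ (addFrom a m).2 ∧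
      val (addFrom a m).1 + (addFrom a m).2 * 10 ^ a.length = val a + val m := by
  intro a
  induction a with
  | nil =>
    intro m hlen _ _
    have : m = [] := List.eq_nil_of_length_eq_zero hlen.symm
    subst this
    refine ⟨rfl, ?_, le_rfl, by simp [addFrom, val]⟩
    intro d hd
    simp [addFrom] at hd
  | cons x as ih =>
    intro m hlen ha hm
    cases m with
    | nil => simp at hlen
    | cons y ms =>
      obtain ⟨l1, d1, c1, v1⟩ := ih ms (by simpa using hlen)
        (fun d hd => ha d (List.mem_cons_of_mem _ hd))
        (fun d hd => hm d (List.mem_cons_of_mem _ hd))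
      have hx := ha x (by simp)
      have hy := hm y (by simp)
      have htmp : 0 ≤ x + y + (addFrom as ms).2 := by omega
      have hmod := Int.emod_add_mul_ediv (x + y + (addFrom as ms).2) 10
      have hlen' : as.length = ms.length := by simpa using hlen
      refine ⟨by simp [addFrom, l1], ?_, ?_, ?_⟩
      · intro d hd
        simp only [addFrom, List.mem_cons] at hd
        rcases hd with rfl | hd
        · exact ⟨PySem.Int.mod_nonneg _ (by norm_num), PySem.Int.mod_lt _ (by norm_num)⟩
        · exact d1 d hd
      · simp only [addFrom, PySem.Int.floordiv_eq_ediv_of_pos (by norm_num : (0:Int) < 10)]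
        exact Int.ediv_nonneg htmp (by norm_num)
      · simp only [addFrom, PySem.Int.floordiv_eq_ediv_of_pos (by norm_num : (0:Int) < 10),
          PySem.Int.mod_eq_emod_of_pos (by norm_num : (0:Int) < 10)]
        rw [val_cons, val_cons, val_cons, l1, hlen', List.length_cons]
        rw [← hlen']
        simp only [pow_succ]
        linear_combination (10:Int) ^ as.length * hmod + v1

/-- no carry is dropped when the sum still fits -/
theorem addFrom_val {a m : List Int} (hlen : a.length = m.length)
    (ha : DigitsOk a) (hm : ∀ d ∈ m, 0 ≤ d)
    (hfit : val a + val m < 10 ^ a.length) :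
    val (addFrom a m).1 = val a + val m := by
  obtain ⟨_, d1, c1, v1⟩ := addFrom_spec a m hlen ha hm
  have hv0 : 0 ≤ val (addFrom a m).1 := val_nonneg (fun d hd => (d1 d hd).1)
  have hp : (0:Int) < 10 ^ a.length := by positivity
  have hc0 : (addFrom a m).2 = 0 := by nlinarith
  rw [hc0] at v1
  linarith [v1]

theorem val_eq_zero {l : List Int} (h0 : ∀ d ∈ l, 0 ≤ d) (hle : ∀ d ∈ l, d ≤ 0) :
    val l = 0 := by
  induction l with
  | nil => simp [val]
  | cons x xs ih =>
    rw [val_cons]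
    have hx0 := h0 x (by simp)
    have hx1 := hle x (by simp)
    have : x = 0 := le_antisymm hx1 hx0
    subst this
    simpa using ih (fun d hd => h0 d (List.mem_cons_of_mem _ hd))
      (fun d hd => hle d (List.mem_cons_of_mem _ hd))

/-- the two loops run in lock-step: A's loop returns a digit list whose value is
    exactly what the integer loop returns -/
theorem loopA_char (i : Int) (add mul : List Int) (hmul : DigitsOk mul) (hi : 1 ≤ i) :
    DigitsOk add → add.length = mul.length →
    val add + 2 * val mul < 10 ^ mul.length →
    (loopA i add mul hmul hi).length = add.length ∧ DigitsOk (loopA i add mul hmul hi) ∧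
      val (loopA i add mul hmul hi) = intLoop i (val add) (val mul) hi := by
  induction i, add, mul, hmul, hi using loopA.induct with
  | case1 i add mul hmul hi hmx =>
    -- max? mul = none: mul = [] (Python would raise; only reachable for n < 0)
    intro hadd hlen hbound
    have hunf : loopA i add mul hmul hi = add := by
      rw [loopA.eq_def]
      split
      · rfl
      · rename_i heq; (rw [hmx] at heq; exact absurd heq (by simp))
    have hmul0 : mul = [] := (PySem.List.max?_eq_none_iff mul id).mp hmx
    have hv0 : val mul = 0 := by rw [hmul0]; simp [val]
    have hB : intLoop i (val add) (val mul) hi = val add := by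
      rw [intLoop.eq_def, hv0]; simp
    rw [hunf, hB]
    exact ⟨rfl, hadd, rfl⟩
  | case2 i add mul hmul hi m hmx hm ih =>
    intro hadd hlen hbound
    have hpos : 0 < val mul := val_pos (fun d hd => (hmul d hd).1) (PySem.List.max?_mem hmx) hm
    have hva : 0 ≤ val add := val_nonneg (fun d hd => (hadd d hd).1)
    have hvm : 0 ≤ val mul := le_of_lt hpos
    have hfit : val add + val mul < 10 ^ add.length := by rw [hlen]; linarith
    have haddv : val (addFrom add mul).1 = val add + val mul :=
      addFrom_val hlen hadd (fun d hd => (hmul d hd).1) hfit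
    obtain ⟨haddl, haddOk, _, _⟩ := addFrom_spec add mul hlen hadd (fun d hd => (hmul d hd).1)
    have hdl : (divStep (i + 1) 0 mul).length = mul.length := divStep_length _ _ _
    have hdv : val (divStep (i + 1) 0 mul) = val mul / (i + 1) := by
      rw [divStep_val (by omega) mul 0 le_rfl (by omega)]; simp
    have hhalf : 2 * (val mul / (i + 1)) ≤ val mul := by
      have h1 : 0 ≤ val mul / (i + 1) := Int.ediv_nonneg hvm (by omega)
      have h2 : val mul / (i + 1) * (i + 1) ≤ val mul := Int.ediv_mul_le _ (by omega)
      nlinarith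
    have hbound' : val (addFrom add mul).1 + 2 * val (divStep (i + 1) 0 mul)
        < 10 ^ (divStep (i + 1) 0 mul).length := by
      rw [haddv, hdv, hdl]
      linarith
    obtain ⟨ihL, ihOk, ihv⟩ := ih haddOk (by rw [haddl, hdl, hlen]) hbound'
    have hunf : loopA i add mul hmul hi
        = loopA (i + 1) (addFrom add mul).1 (divStep (i + 1) 0 mul)
            (divStep_digitsOk (by omega) mul hmul 0 le_rfl (by omega)) (by omega) := by
      rw [loopA.eq_def]
      split
      · rename_i heq; (rw [hmx] at heq; exact absurd heq (by simp))
      · rename_i m' heq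
        rw [hmx] at heq
        cases heq
        exact dif_pos hm
    have hB : intLoop i (val add) (val mul) hi
        = intLoop (i + 1) (val add + val mul) (val mul / (i + 1)) (by omega) := by
      rw [intLoop.eq_def, dif_pos hpos, PySem.Int.floordiv_eq_ediv_of_pos (by omega : (0:Int) < i + 1)]
    rw [hunf, hB]
    refine ⟨by rw [ihL, haddl], ihOk, ?_⟩
    rw [ihv, haddv, hdv]
  | case3 i add mul hmul hi m hmx hm =>
    intro hadd hlen hbound
    have hunf : loopA i add mul hmul hi = add := by
      rw [loopA.eq_def]
      split
      · rename_i heq; rw [hmx] at heq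
      · rename_i m' heq
        rw [hmx] at heq
        cases heq
        exact dif_neg hm
    have hv0 : val mul = 0 :=
      val_eq_zero (fun d hd => (hmul d hd).1)
        (fun d hd => le_trans (PySem.List.max?_isMax hmx d hd) (by simp only [id_eq]; omega))
    have hB : intLoop i (val add) (val mul) hi = val add := by
      rw [intLoop.eq_def, hv0]; simp
    rw [hunf, hB]
    exact ⟨rfl, hadd, rfl⟩

theorem val_replicate_zero (k : Nat) : val (List.replicate k 0) = 0 :=
  val_eq_zero (fun d hd => by rw [List.eq_of_mem_replicate hd])
    (fun d hd => by rw [List.eq_of_mem_replicate hd])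

/-- A's integer loop is add + the nested-floor-division sum -/
theorem intLoop_eq_nsum (i add mul : Int) (hi : 1 ≤ i) (hm : 0 ≤ mul) :
    intLoop i add mul hi = add + nsum (i + 1) mul (by omega) := by
  induction i, add, mul, hi using intLoop.induct with
  | case1 i add mul hi h ih =>
    have h0 : (0:Int) ≤ PySem.Int.floordiv mul (i + 1) := by
      rw [PySem.Int.floordiv_eq_ediv_of_pos (by omega : (0:Int) < i + 1)]
      exact Int.ediv_nonneg (by omega) (by omega)
    rw [intLoop.eq_def, dif_pos h, ih h0]
    conv_rhs => rw [nsum.eq_def]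
    rw [dif_pos h]
    ring
  | case2 i add mul hi h =>
    rw [intLoop.eq_def, dif_neg h, nsum.eq_def, dif_neg h]
    ring

/-- B's weighted digit sum over the factorial-base digits equals the nested sum:
    sumLoop (csLoop q k) s b (k-1) = s + (b-1)*q + nsum k q -/
theorem sumLoop_csLoop : ∀ (q k : Int) (hk : 2 ≤ k), 0 ≤ q → ∀ (s b : Int),
    sumLoop (csLoop q k hk) s b (k - 1) = s + (b - 1) * q + nsum k q hk := by
  intro q k hk
  induction q, k, hk using csLoop.induct with
  | case1 q k hk h ih =>
    intro _ s b
    have hkpos : (0:Int) < k := by omega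
    have hcons : csLoop q k hk
        = PySem.Int.mod q k :: csLoop (PySem.Int.floordiv q k) (k + 1) (by omega) := by
      rw [csLoop.eq_def, dif_pos h]
    rw [hcons]
    have hstep : sumLoop (PySem.Int.mod q k :: csLoop (PySem.Int.floordiv q k) (k + 1) (by omega))
        s b (k - 1)
        = sumLoop (csLoop (PySem.Int.floordiv q k) (k + 1) (by omega))
            (s + PySem.Int.mod q k * b) ((k - 1 + 1) * b + 1) (k - 1 + 1) := rfl
    rw [hstep]
    have hidx : k - 1 + 1 = k + 1 - 1 := by ring
    rw [hidx]
    have hq' : (0:Int) ≤ PySem.Int.floordiv q k := by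
      rw [PySem.Int.floordiv_eq_ediv_of_pos hkpos]
      exact Int.ediv_nonneg (by omega) (by omega)
    rw [ih hq' ((s + PySem.Int.mod q k * b)) ((k + 1 - 1) * b + 1)]
    conv_rhs => rw [nsum.eq_def]
    rw [dif_pos h,
        PySem.Int.mod_eq_emod_of_pos hkpos, PySem.Int.floordiv_eq_ediv_of_pos hkpos]
    have hqk := Int.emod_add_mul_ediv q k
    linear_combination b * hqk
  | case2 q k hk h =>
    intro hq s b
    have hq0 : csLoop q k hk = [] := by rw [csLoop.eq_def, dif_neg h]
    have hz : q = 0 := by omega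
    subst hz
    rw [hq0, nsum.eq_def, dif_neg h]
    have : sumLoop ([] : List Int) s b (k - 1) = s := rfl
    rw [this]
    ring

/-- filling decimal digits back-to-front recovers the digit list -/
theorem fill_spec : ∀ (l suffix out : List Int), DigitsOk l → out.length = l.length →
    fillLoop ((l.length : Int) - 1) (val l) (out ++ suffix) = l ++ suffix := by
  intro l
  induction l using List.reverseRecOn with
  | nil =>
    intro suffix out _ hlen
    have : out = [] := List.eq_nil_of_length_eq_zero hlen
    subst this
    rw [fillLoop.eq_def]
    norm_num
  | append_singleton xs x ih =>
    intro suffix out hok hlen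
    rcases out.eq_nil_or_concat with rfl | ⟨out1, o, rfl⟩
    · simp at hlen
    · rw [List.concat_eq_append] at hlen ⊢
      have hlen1 : out1.length = xs.length := by
        simpa using hlen
      have hx := hok x (by simp)
      have hxs : DigitsOk xs := fun d hd => hok d (by simp [hd])
      have hvxs : 0 ≤ val xs := val_nonneg (fun d hd => (hxs d hd).1)
      have hv : val (xs ++ [x]) = x + 10 * val xs := by
        simp only [val, List.foldl_append, List.foldl_cons, List.foldl_nil]
        rw [show List.foldl (fun a d => 10 * a + d) 0 xs = val xs from rfl]
        ring
      have hdiv : PySem.Int.floordiv (val (xs ++ [x])) 10 = val xs := by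
        rw [PySem.Int.floordiv_eq_ediv_of_pos (by norm_num : (0:Int) < 10), hv,
          show x + 10 * val xs = x + val xs * 10 by ring,
          Int.add_mul_ediv_right _ _ (by norm_num : (10:Int) ≠ 0),
          Int.ediv_eq_zero_of_lt hx.1 hx.2]
        ring
      have hmod : PySem.Int.mod (val (xs ++ [x])) 10 = x := by
        rw [PySem.Int.mod_eq_emod_of_pos (by norm_num : (0:Int) < 10), hv,
          Int.add_mul_emod_self_left, Int.emod_eq_of_lt hx.1 hx.2]
      have hL : (((xs ++ [x]).length : Int) - 1) = (xs.length : Int) := by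
        simp
      have hnn : (0:Int) ≤ (xs.length : Int) := Int.natCast_nonneg _
      rw [hL, fillLoop.eq_def, dif_pos hnn, hmod, hdiv]
      have htn : (xs.length : Int).toNat = xs.length := by omega
      have hset : ((out1 ++ [o]) ++ suffix).set (xs.length : Int).toNat x
          = out1 ++ (x :: suffix) := by
        rw [htn, List.append_assoc, ← hlen1,
            List.set_append_right _ _ (le_refl _)]
        simp
      rw [hset]
      have := ih (x :: suffix) out1 hxs hlen1
      rw [this]
      simp

-- ===== VERDICT (by name: the statement is the Claim_ definition above) =====
theorem f_spec : Claim_equal_f := by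
  unfold Claim_equal_f
  intro n _ hpre
  unfold Pre_f at hpre
  unfold Spec_f
  show f n = f_alt n
  have hk : (n + 1).toNat = n.toNat + 1 := by omega
  have hl0 : (List.replicate (n + 1).toNat (0:Int)).set 0 1
      = 1 :: List.replicate n.toNat (0:Int) := by
    rw [hk, List.replicate_succ]; rfl
  have hval0 : val ((List.replicate (n + 1).toNat (0:Int)).set 0 1) = 10 ^ n.toNat := by
    rw [hl0, val_cons, List.length_replicate, val_replicate_zero]; ring
  have hlen0 : ((List.replicate (n + 1).toNat (0:Int)).set 0 1).length = n.toNat + 1 := by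
    rw [hl0]; simp
  have hp : (0:Int) < 10 ^ n.toNat := by positivity
  have hbound : val ((List.replicate (n + 1).toNat (0:Int)).set 0 1)
      + 2 * val ((List.replicate (n + 1).toNat (0:Int)).set 0 1)
      < 10 ^ ((List.replicate (n + 1).toNat (0:Int)).set 0 1).length := by
    rw [hval0, hlen0, pow_succ]; linarith
  obtain ⟨hL, hOk, hv⟩ := loopA_char 1 _ _ (digitsOk_init ((n + 1).toNat)) le_rfl
    (digitsOk_init ((n + 1).toNat)) rfl hbound
  -- the value of A's result: P + nsum 2 P
  rw [hval0] at hv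
  rw [intLoop_eq_nsum 1 _ _ le_rfl (le_of_lt hp)] at hv
  norm_num at hv
  -- B's summed value is the same
  have hs : sumLoop (csLoop ((10:Int) ^ n.toNat) 2 (by omega)) ((10:Int) ^ n.toNat) 1 1
      = (10:Int) ^ n.toNat + nsum 2 ((10:Int) ^ n.toNat) (by omega) := by
    have h21 : (2:Int) - 1 = 1 := by norm_num
    have := sumLoop_csLoop ((10:Int) ^ n.toNat) 2 (by omega) (le_of_lt hp)
      ((10:Int) ^ n.toNat) 1
    rw [h21] at this
    rw [this]
    ring
  -- B's fill loop reconstructs exactly A's digit list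
  have hlenA : ((loopA 1 ((List.replicate (n + 1).toNat (0:Int)).set 0 1)
      ((List.replicate (n + 1).toNat (0:Int)).set 0 1)
      (digitsOk_init ((n + 1).toNat)) le_rfl).length : Int) - 1 = n := by
    rw [hL, hlen0]
    omega
  have hfill := fill_spec (loopA 1 ((List.replicate (n + 1).toNat (0:Int)).set 0 1)
      ((List.replicate (n + 1).toNat (0:Int)).set 0 1)
      (digitsOk_init ((n + 1).toNat)) le_rfl) []
      (List.replicate (n + 1).toNat (0:Int)) hOk (by rw [hL, hlen0, hk]; simp)
  rw [hlenA, List.append_nil, List.append_nil, hv] at hfill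
  show _ = fillLoop n (sumLoop (csLoop ((10:Int) ^ n.toNat) 2 (by omega)) ((10:Int) ^ n.toNat) 1 1)
      (List.replicate (n + 1).toNat (0:Int))
  rw [hs]
  exact hfill.symm
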